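-- pv_equiv track=rewrite | github.com/damir-gavric/epub-sentence-fixer | main.py | _leading_focus_phrase
-- ===== SOURCE A (Python) =====
-- def _leading_focus_phrase(text: str, max_words: int = 4) -> str:
--     words = text.strip().split()
--     if not words:
--         return ""
--     chosen = []
--     for word in words[:max_words]:
--         chosen.append(word)
--         if word.endswith((",", ";", ":", ".")):
--             break
--     return " ".join(chosen)
-- ===== SOURCE B (Python) =====
-- def _leading_focus_phrase(text: str, max_words: int = 4) -> str:
--     def take(words, budget):
--         if not words or budget <= 0:
--             return ""
--         head, rest = words[0], words[1:]
--         if head.endswith((",", ";", ":", ".")):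
--             return head
--         tail = take(rest, budget - 1)
--         return head if not tail else head + " " + tail
--     return take(text.strip().split(), max_words)
-- ===== Notes on version B (the rewrite author's own statement) =====
-- stated objective: alternative
-- what changed: Replaced the accumulate-and-break loop plus a final join with a recursive descent over the word list carrying a budget counter, assembling the phrase back-to-front by string concatenation with no slicing and no join.
-- intended difference: When max_words is negative and the text has more than -max_words words, A's words[:max_words] silently drops the last -max_words words and returns a phrase built from the rest, while B returns the empty string, the intended reading of a non-positive word limit. — e.g. on _leading_focus_phrase("a b", -1): A returns "a", B returns ""
import Mathlib
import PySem

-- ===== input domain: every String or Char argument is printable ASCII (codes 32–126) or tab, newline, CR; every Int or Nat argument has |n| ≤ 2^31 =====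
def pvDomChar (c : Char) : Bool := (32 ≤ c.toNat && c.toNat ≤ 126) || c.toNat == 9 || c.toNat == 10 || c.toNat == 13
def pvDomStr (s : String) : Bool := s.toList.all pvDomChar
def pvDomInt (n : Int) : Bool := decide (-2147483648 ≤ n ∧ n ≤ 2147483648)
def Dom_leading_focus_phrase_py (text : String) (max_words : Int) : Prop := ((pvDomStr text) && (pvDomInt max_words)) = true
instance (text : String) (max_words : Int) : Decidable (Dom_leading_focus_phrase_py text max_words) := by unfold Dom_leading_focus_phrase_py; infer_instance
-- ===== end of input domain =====

-- B replaces the accumulating loop + " ".join with a recursive descent over the word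
-- list carrying a budget counter and assembling the phrase back-to-front by string
-- concatenation (alternative decomposition, same cost).

-- ===== PORT A =====
-- Punctuation test w.endswith((",", ";", ":", ".")) — the same test appears in both Pythons.
def pvEndsPunct (w : String) : Bool :=
  PySem.Str.endswith w "," || PySem.Str.endswith w ";" ||
  PySem.Str.endswith w ":" || PySem.Str.endswith w "."

-- A's loop: append each word to `chosen`, break after a punctuation-terminated word.
def pvALoop (ws : List String) (chosen : List String) : List String :=
  match ws with
  | [] => chosen
  | w :: rest =>
      let chosen' := chosen ++ [w]
      if pvEndsPunct w then chosen' else pvALoop rest chosen'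

def leading_focus_phrase_py (text : String) (max_words : Int) : String :=
  let words := PySem.Str.split₀ (PySem.Str.strip text)
  if words.isEmpty then ""
  else PySem.Str.join " " (pvALoop (PySem.List.slice words none (some max_words)) [])

-- ===== PORT B =====
-- B's inner `take(words, budget)`: recursion on the word list with a budget counter,
-- building the result by string concatenation (no slicing, no join).
def pvTake (ws : List String) (budget : Int) : String :=
  match ws with
  | [] => ""
  | head :: rest =>
      if budget ≤ 0 then ""
      else if pvEndsPunct head then head
      else
        let tail := pvTake rest (budget - 1)
        if tail = "" then head else head ++ " " ++ tail

def leading_focus_phrase_py_alt (text : String) (max_words : Int) : String :=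
  pvTake (PySem.Str.split₀ (PySem.Str.strip text)) max_words

-- ===== PRECONDITION & SPEC =====
-- On max_words < 0 with more than -max_words words, A's slice words[:max_words] silently
-- drops the LAST -max_words words (negative-slice wraparound) and returns a phrase, while
-- B returns the empty string, the intended reading of a non-positive word limit.
def D_leading_focus_phrase_py (text : String) (max_words : Int) : Prop :=
  max_words < 0 ∧ (-max_words) < ((PySem.Str.split₀ (PySem.Str.strip text)).length : Int)
instance (text : String) (max_words : Int) : Decidable (D_leading_focus_phrase_py text max_words) := by unfold D_leading_focus_phrase_py; infer_instance

def Spec_leading_focus_phrase_py (text : String) (max_words : Int) (out : String) : Prop := ¬ D_leading_focus_phrase_py text max_words → out = leading_focus_phrase_py_alt text max_words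
instance (text : String) (max_words : Int) (out : String) : Decidable (Spec_leading_focus_phrase_py text max_words out) := by unfold Spec_leading_focus_phrase_py; infer_instance

def pvDiffWitness_leading_focus_phrase_py : String × Int := ("a b", -1)
def pvDiffWitnessOut_leading_focus_phrase_py : String × String := ("a", "")

-- ===== CLAIM (what is proved, stated in full; the proofs are below) =====
def Claim_unchanged_leading_focus_phrase_py : Prop := ∀ (text : String) (max_words : Int), Dom_leading_focus_phrase_py text max_words → Spec_leading_focus_phrase_py text max_words (leading_focus_phrase_py text max_words)
def Claim_changed_leading_focus_phrase_py : Prop := Dom_leading_focus_phrase_py (pvDiffWitness_leading_focus_phrase_py.1) (pvDiffWitness_leading_focus_phrase_py.2) ∧ D_leading_focus_phrase_py (pvDiffWitness_leading_focus_phrase_py.1) (pvDiffWitness_leading_focus_phrase_py.2) ∧ leading_focus_phrase_py (pvDiffWitness_leading_focus_phrase_py.1) (pvDiffWitness_leading_focus_phrase_py.2) = pvDiffWitnessOut_leading_focus_phrase_py.1 ∧ leading_focus_phrase_py_alt (pvDiffWitness_leading_focus_phrase_py.1) (pvDiffWitness_leading_focus_phrase_py.2) = pvDiffWitnessOut_leading_focus_phrase_py.2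 ∧ pvDiffWitnessOut_leading_focus_phrase_py.1 ≠ pvDiffWitnessOut_leading_focus_phrase_py.2
def Claim_exact_leading_focus_phrase_py : Prop := ∀ (text : String) (max_words : Int), Dom_leading_focus_phrase_py text max_words → D_leading_focus_phrase_py text max_words → leading_focus_phrase_py text max_words ≠ leading_focus_phrase_py_alt text max_words

-- ===== LEMMAS AND PROOFS =====

-- Every word produced by str.split() is nonempty (invariant of split₀.go's accumulator).
theorem pv_go_ne_nil (s : List Char) : ∀ (cur : List Char) (acc : List (List Char)),
    (∀ w ∈ acc, w ≠ []) → ∀ w ∈ PySem.Chars.split₀.go s cur acc, w ≠ [] := by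
  induction s with
  | nil =>
      intro cur acc hacc w hw
      unfold PySem.Chars.split₀.go at hw
      by_cases hc : cur.isEmpty
      · simp [hc] at hw; exact hacc w hw
      · simp [hc] at hw
        rcases hw with hw | hw
        · exact hacc w hw
        · subst hw; simpa [List.isEmpty_iff] using hc
  | cons c rest ih =>
      intro cur acc hacc w hw
      unfold PySem.Chars.split₀.go at hw
      by_cases hs : PySem.Chars.isspace c
      · by_cases hc : cur.isEmpty
        · simp [hs, hc] at hw; exact ih [] acc hacc w hw
        · simp [hs, hc] at hw
          refine ih [] (cur.reverse :: acc) ?_ w hw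
          intro x hx
          rcases List.mem_cons.mp hx with hx | hx
          · subst hx; simpa [List.isEmpty_iff] using hc
          · exact hacc x hx
      · simp [hs] at hw
        exact ih (c :: cur) acc hacc w hw

theorem pv_split₀_ne_empty (s : String) : ∀ w ∈ PySem.Str.split₀ s, w ≠ "" := by
  intro w hw
  unfold PySem.Str.split₀ at hw
  simp only [List.mem_map] at hw
  obtain ⟨l, hl, rfl⟩ := hw
  have hne : l ≠ [] := pv_go_ne_nil s.toList [] [] (by simp) l (by simpa [PySem.Chars.split₀] using hl)
  intro h
  have : l = ("" : String).toList := by rw [← h]; simp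
  simp at this
  exact hne this

-- pvALoop's accumulator splits off.
theorem pvALoop_acc (l : List String) : ∀ chosen, pvALoop l chosen = chosen ++ pvALoop l [] := by
  induction l with
  | nil => intro chosen; simp [pvALoop]
  | cons w rest ih =>
      intro chosen
      by_cases h : pvEndsPunct w
      · simp [pvALoop, h]
      · simp only [pvALoop, h, Bool.false_eq_true, if_false, List.nil_append]
        rw [ih (chosen ++ [w]), ih [w]]
        simp

theorem mem_pvALoop (l : List String) : ∀ x ∈ pvALoop l [], x ∈ l := by
  induction l with
  | nil => simp [pvALoop]
  | cons w rest ih =>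
      intro x hx
      simp only [pvALoop, List.nil_append] at hx
      by_cases h : pvEndsPunct w
      · rw [if_pos h] at hx
        simp only [List.mem_singleton] at hx
        simp [hx]
      · rw [if_neg h, pvALoop_acc] at hx
        rcases List.mem_append.mp hx with hx | hx
        · simp only [List.mem_singleton] at hx
          simp [hx]
        · exact List.mem_cons_of_mem _ (ih x hx)

-- join with a single-space separator on a cons, as B's concatenation sees it.
theorem pv_join_cons (w : String) (L : List String) :
    PySem.Str.join " " (w :: L) =
      if L = [] then w else w ++ " " ++ PySem.Str.join " " L := by
  cases L with
  | nil =>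
      rw [if_pos rfl]
      unfold PySem.Str.join
      rw [List.map_cons, List.map_nil, PySem.Chars.join_singleton, String.ofList_toList]
  | cons y ys =>
      rw [if_neg (by simp)]
      unfold PySem.Str.join
      rw [List.map_cons (l := y :: ys), List.map_cons (l := ys), PySem.Chars.join_cons_cons]
      apply String.ext
      simp

theorem pv_join_cons_ne_empty (w : String) (hw : w ≠ "") (L : List String) :
    PySem.Str.join " " (w :: L) ≠ "" := by
  rw [pv_join_cons]
  split
  · exact hw
  · intro h
    have := congrArg String.toList h
    simp at this

theorem pvTake_nonpos (ws : List String) (k : Int) (hk : k ≤ 0) : pvTake ws k = "" := by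
  cases ws with
  | nil => rfl
  | cons w rest => simp [pvTake, hk]

-- Main bridge: B's budget recursion equals join of A's loop over the first k words.
theorem pvTake_eq (ws : List String) : ∀ (k : Int), 0 ≤ k → (∀ w ∈ ws, w ≠ "") →
    pvTake ws k = PySem.Str.join " " (pvALoop (List.take k.toNat ws) []) := by
  induction ws with
  | nil =>
      intro k _ _
      simp [pvTake, pvALoop, PySem.Str.join, PySem.Chars.join, List.intercalate]
  | cons w rest ih =>
      intro k hk hne
      by_cases hk0 : k ≤ 0
      · have : k = 0 := le_antisymm hk0 hk
        subst this
        simp [pvTake, pvALoop, PySem.Str.join, PySem.Chars.join, List.intercalate]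
      · have hpos : 0 < k := lt_of_not_ge hk0
        have htn : k.toNat = (k - 1).toNat + 1 := by omega
        rw [htn, List.take_succ_cons]
        by_cases hp : pvEndsPunct w
        · simp only [pvTake, if_neg hk0, pvALoop, List.nil_append, if_pos hp]
          rw [pv_join_cons]
          simp
        · simp only [pvTake, if_neg hk0, pvALoop, List.nil_append, if_neg hp]
          rw [pvALoop_acc, List.singleton_append,
            ih (k - 1) (by omega) (fun x hx => hne x (List.mem_cons_of_mem _ hx))]
          set L := pvALoop (List.take (k - 1).toNat rest) [] with hL
          rw [pv_join_cons]
          by_cases hLe : L = []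
          · simp [hLe, PySem.Str.join, PySem.Chars.join, List.intercalate]
          · rw [if_neg hLe]
            obtain ⟨y, ys, hcons⟩ := List.exists_cons_of_ne_nil hLe
            have hy : y ≠ "" := by
              have hyL : y ∈ List.take (k - 1).toNat rest :=
                mem_pvALoop _ y (by rw [← hL, hcons]; simp)
              exact hne y (List.mem_cons_of_mem _ (List.mem_of_mem_take hyL))
            rw [hcons, if_neg (pv_join_cons_ne_empty y hy ys)]

-- words[:m] is empty when m < 0 and len(words) ≤ -m.
theorem pv_slice_neg_nil {α : Type} (xs : List α) (m : Int) (hm : m < 0)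
    (hlen : (xs.length : Int) ≤ -m) : PySem.List.slice xs none (some m) = [] := by
  simp only [PySem.List.slice, PySem.List.clampIdx, if_pos hm]
  split
  · simp
  · have : ((xs.length : Int) + m).toNat = 0 := by omega
    simp [this]

-- ===== VERDICT (by name: the statements are the Claim_ definitions above) =====
theorem leading_focus_phrase_py_spec : Claim_unchanged_leading_focus_phrase_py := by
  intro text max_words _ hnD
  simp only [leading_focus_phrase_py, leading_focus_phrase_py_alt]
  unfold D_leading_focus_phrase_py at hnD
  have hne := pv_split₀_ne_empty (PySem.Str.strip text)
  generalize PySem.Str.split₀ (PySem.Str.strip text) = ws at hnD hne ⊢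
  by_cases hm : 0 ≤ max_words
  · rw [PySem.List.slice_to ws hm]
    by_cases hE : ws.isEmpty
    · rw [List.isEmpty_iff] at hE
      simp [hE, pvTake]
    · simp only [hE, Bool.false_eq_true, if_false]
      exact (pvTake_eq ws max_words hm hne).symm
  · have hm' : max_words < 0 := lt_of_not_ge hm
    have hlen : (ws.length : Int) ≤ -max_words := by
      by_contra h
      exact hnD ⟨hm', by omega⟩
    rw [pv_slice_neg_nil ws max_words hm' hlen, pvTake_nonpos ws max_words (le_of_lt hm')]
    by_cases hE : ws.isEmpty <;>
      simp [hE, pvALoop, PySem.Str.join, PySem.Chars.join, List.intercalate]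

set_option maxHeartbeats 2000000 in
theorem leading_focus_phrase_py_changed : Claim_changed_leading_focus_phrase_py := by
  unfold Claim_changed_leading_focus_phrase_py; decide

theorem leading_focus_phrase_py_tight : Claim_exact_leading_focus_phrase_py := by
  intro text max_words _ hD
  unfold D_leading_focus_phrase_py at hD
  obtain ⟨hm, hlen⟩ := hD
  simp only [leading_focus_phrase_py, leading_focus_phrase_py_alt]
  have hne := pv_split₀_ne_empty (PySem.Str.strip text)
  generalize PySem.Str.split₀ (PySem.Str.strip text) = ws at hlen hne ⊢
  rw [pvTake_nonpos ws max_words (le_of_lt hm)]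
  have hwsne : ws ≠ [] := by
    intro h
    rw [h] at hlen
    simp at hlen
    omega
  obtain ⟨w, rest, hcons⟩ := List.exists_cons_of_ne_nil hwsne
  have hE : ws.isEmpty = false := by simp [hcons]
  simp only [hE, Bool.false_eq_true, if_false]
  -- the slice is nonempty: its length is len + max_words > 0
  have hslice : ∃ y ys, PySem.List.slice ws none (some max_words) = y :: ys ∧ y ∈ ws := by
    have : PySem.List.slice ws none (some max_words) =
        List.take ((ws.length : Int) + max_words).toNat ws := by
      simp only [PySem.List.slice, PySem.List.clampIdx, if_pos hm]
      have : ¬ ((ws.length : Int) + max_words < 0) := by omega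
      simp [this]
    rw [this]
    have hpos : 0 < ((ws.length : Int) + max_words).toNat := by omega
    cases h : List.take ((ws.length : Int) + max_words).toNat ws with
    | nil =>
        exfalso
        have hl := congrArg List.length h
        rw [List.length_take, List.length_nil] at hl
        omega
    | cons y ys =>
        refine ⟨y, ys, rfl, ?_⟩
        exact List.mem_of_mem_take (h ▸ List.mem_cons_self)
  obtain ⟨y, ys, hsl, hy⟩ := hslice
  rw [hsl]
  have hyne : y ≠ "" := hne y hy
  by_cases hp : pvEndsPunct y
  · simp only [pvALoop, List.nil_append, if_pos hp]
    exact pv_join_cons_ne_empty y hyne []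
  · simp only [pvALoop, List.nil_append, if_neg hp]
    rw [pvALoop_acc]
    exact pv_join_cons_ne_empty y hyne _
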